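-- pv_equiv track=rewrite | github.com/azulamakk/estructuraDeDatosyProgramacion | TP06/Ejercicio4.py | comprobacionObjetosCuadrados
-- ===== SOURCE A (Python) =====
-- def comprobacionObjetosCuadrados(numerosOriginales,numerosCuadrados):
--     cumple=[]
--     for i in range(len(numerosOriginales)):
--         numeroAlCuadrado=numerosOriginales[i]^2
--         if numeroAlCuadrado not in numerosCuadrados:
--             cumple.append(True)
--         else:
--             cumple.append(False)
--     if False in cumple:
--         return "Los dos vectores no son iguales"
--     else:
--         return "Los dos vectores son iguales"
-- ===== SOURCE B (Python) =====
-- def comprobacionObjetosCuadrados(numerosOriginales, numerosCuadrados):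
--     # Build a hash index of the XOR-2 values once, then stream the OTHER list
--     # with an early exit at the first hit (A instead loops over the originals,
--     # linearly scans numerosCuadrados for each, builds a bool list, and scans it).
--     xored = {x ^ 2 for x in numerosOriginales}
--     for c in numerosCuadrados:
--         if c in xored:
--             return "Los dos vectores no son iguales"
--     return "Los dos vectores son iguales"
-- ===== Notes on version B (the rewrite author's own statement) =====
-- stated objective: faster
-- what changed: B reverses the traversal: it builds a hash set of the XOR-2 values of numerosOriginales once and then streams numerosCuadrados with an early return at the first hit, instead of A's index loop over the originals that linearly scans numerosCuadrados for each element, accumulates a bool list and scans that list for False.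
import Mathlib
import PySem

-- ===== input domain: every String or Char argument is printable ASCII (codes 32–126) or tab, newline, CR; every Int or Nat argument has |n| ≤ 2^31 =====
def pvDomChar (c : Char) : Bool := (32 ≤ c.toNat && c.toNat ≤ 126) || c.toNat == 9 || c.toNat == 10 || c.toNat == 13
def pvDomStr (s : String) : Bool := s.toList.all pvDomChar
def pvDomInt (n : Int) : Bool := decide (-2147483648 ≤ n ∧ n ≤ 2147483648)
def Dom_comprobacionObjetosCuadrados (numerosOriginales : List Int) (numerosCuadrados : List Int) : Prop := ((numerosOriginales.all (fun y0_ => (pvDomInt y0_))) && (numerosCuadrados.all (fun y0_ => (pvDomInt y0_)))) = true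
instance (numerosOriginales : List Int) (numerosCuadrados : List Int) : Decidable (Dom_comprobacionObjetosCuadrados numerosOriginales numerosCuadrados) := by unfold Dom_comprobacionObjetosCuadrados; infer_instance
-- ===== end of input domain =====

-- B builds a hash set of the XOR-2 values of the originals once and streams numerosCuadrados
-- with an early return at the first hit, instead of A's per-original membership scans plus a
-- bool-list accumulation (timed measurably faster at the largest size by the check).

-- ===== PORT A =====
def comprobacionObjetosCuadrados (numerosOriginales : List Int) (numerosCuadrados : List Int) : String :=
  -- cumple built by the range-index loop; numerosOriginales[i] is in range, ported via pyGetD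
  let cumple : List Bool :=
    (PySem.List.pyRange 0 (PySem.List.len numerosOriginales) 1).foldl
      (fun acc i =>
        let numeroAlCuadrado := PySem.Int.bxor (PySem.List.pyGetD numerosOriginales i 0) 2
        if numeroAlCuadrado ∉ numerosCuadrados then acc ++ [true] else acc ++ [false]) []
  if false ∈ cumple then "Los dos vectores no son iguales"
  else "Los dos vectores son iguales"

-- ===== PORT B =====
-- the early-exit 'for c in numerosCuadrados' loop of Source B, as structural recursion
def cocWalk (xored : PySem.Set Int) : List Int → String
  | [] => "Los dos vectores son iguales"
  | y :: ys =>
    if PySem.Set.contains xored y then "Los dos vectores no son iguales"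
    else cocWalk xored ys

def comprobacionObjetosCuadrados_alt (numerosOriginales : List Int) (numerosCuadrados : List Int) : String :=
  let xored : PySem.Set Int := PySem.Set.ofList (numerosOriginales.map (fun x => PySem.Int.bxor x 2))
  cocWalk xored numerosCuadrados

-- ===== PRECONDITION & SPEC =====
def Spec_comprobacionObjetosCuadrados (numerosOriginales : List Int) (numerosCuadrados : List Int) (out : String) : Prop := out = comprobacionObjetosCuadrados_alt numerosOriginales numerosCuadrados
instance (numerosOriginales : List Int) (numerosCuadrados : List Int) (out : String) : Decidable (Spec_comprobacionObjetosCuadrados numerosOriginales numerosCuadrados out) := by unfold Spec_comprobacionObjetosCuadrados; infer_instance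

-- ===== CLAIM =====
def Claim_equal_comprobacionObjetosCuadrados : Prop := ∀ (numerosOriginales : List Int) (numerosCuadrados : List Int), Dom_comprobacionObjetosCuadrados numerosOriginales numerosCuadrados → Spec_comprobacionObjetosCuadrados numerosOriginales numerosCuadrados (comprobacionObjetosCuadrados numerosOriginales numerosCuadrados)

-- ===== LEMMAS AND PROOFS =====

-- False appears in A's accumulated bool list iff some original's XOR-2 value lies in numerosCuadrados
theorem false_mem_foldl_cumple (c : List Int) (o : List Int) (init : List Bool) :
    (false ∈ o.foldl
      (fun acc x =>
        if PySem.Int.bxor x 2 ∉ c then acc ++ [true] else acc ++ [false]) init)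
    ↔ (false ∈ init ∨ ∃ x ∈ o, PySem.Int.bxor x 2 ∈ c) := by
  induction o generalizing init with
  | nil => simp
  | cons y ys ih =>
    simp only [List.foldl_cons, ih]
    by_cases h : PySem.Int.bxor y 2 ∈ c
    · simp [h]
    · simp [h]

-- B's early-exit walk answers "no son iguales" exactly when some element of c lies in the set
theorem cocWalk_eq (s : PySem.Set Int) (c : List Int) :
    cocWalk s c = (if ∃ y ∈ c, y ∈ s then "Los dos vectores no son iguales"
                   else "Los dos vectores son iguales") := by
  induction c with
  | nil => simp [cocWalk]
  | cons y ys ih =>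
    by_cases h : y ∈ s
    · simp [cocWalk, PySem.Set.contains, h]
    · simp [cocWalk, PySem.Set.contains, h, ih]

-- ===== VERDICT =====
theorem comprobacionObjetosCuadrados_spec : Claim_equal_comprobacionObjetosCuadrados := by
  intro o c _
  show _ = _
  unfold comprobacionObjetosCuadrados comprobacionObjetosCuadrados_alt
  rw [PySem.List.foldl_pyRange_zero_pyGetD o 0
      (fun acc x => if PySem.Int.bxor x 2 ∉ c then acc ++ [true] else acc ++ [false]) []]
  rw [cocWalk_eq]
  have hA := false_mem_foldl_cumple c o []
  have hiff : (∃ y ∈ c, y ∈ PySem.Set.ofList (o.map (fun x => PySem.Int.bxor x 2)))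
      ↔ ∃ x ∈ o, PySem.Int.bxor x 2 ∈ c := by
    simp only [PySem.Set.mem_ofList, List.mem_map]
    constructor
    · rintro ⟨y, hy, x, hx, hxy⟩
      exact ⟨x, hx, hxy ▸ hy⟩
    · rintro ⟨x, hx, hmem⟩
      exact ⟨PySem.Int.bxor x 2, hmem, x, hx, rfl⟩
  by_cases h : ∃ x ∈ o, PySem.Int.bxor x 2 ∈ c
  · rw [if_pos (hA.mpr (Or.inr h)), if_pos (hiff.mpr h)]
  · have hnf : false ∉ o.foldl
        (fun acc x => if PySem.Int.bxor x 2 ∉ c then acc ++ [true] else acc ++ [false]) [] := by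
      intro hf
      exact h ((hA.mp hf).resolve_left List.not_mem_nil)
    rw [if_neg hnf, if_neg (fun hd => h (hiff.mp hd))]
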